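-- pv_equiv track=rewrite | github.com/the-omega-institute/branch-cubic-regular-s4-closure-prym-ray-class | scripts/exp_branch_cubic_rayclass_modform_audit.py | norm_solutions
-- ===== SOURCE A (Python) =====
-- from math import isqrt
--
-- def norm(alpha: tuple[int, int]) -> int:
--     x, y = alpha
--     return x * x + x * y + 28 * y * y
--
-- def norm_solutions(target: int, bound: int = 500) -> list[list[int]]:
--     sols: list[list[int]] = []
--     for y in range(-bound, bound + 1):
--         disc = 4 * target - 111 * y * y
--         if disc < 0:
--             continue
--         root = isqrt(disc)
--         if root * root != disc:
--             continue
--         for num in (-y + root, -y - root):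
--             if num % 2 == 0:
--                 x = num // 2
--                 if norm((x, y)) == target:
--                     pair = [x, y]
--                     if pair not in sols:
--                         sols.append(pair)
--     return sorted(sols)
-- ===== SOURCE B (Python) =====
-- from math import isqrt
--
-- def norm_solutions(target: int, bound: int = 500) -> list[list[int]]:
--     # Different algorithm: write 4*norm(x,y) = (2*x+y)**2 + 111*y**2 and
--     # enumerate the SQUARE term u = |2*x+y| in 0..isqrt(4*target), testing
--     # whether the remainder 4*target - u*u is 111 times a perfect square v*v
--     # (v = |y|), instead of scanning y and testing the discriminant.  A
--     # solution (x, y) is recovered from each sign combination (±u, ±v) with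
--     # matching parity; dedup via a set, then sort.
--     if target < 0:
--         return []
--     M = 4 * target
--     found = set()
--     for u in range(isqrt(M) + 1):
--         rem = M - u * u
--         if rem % 111 == 0:
--             q = rem // 111
--             v = isqrt(q)
--             if v * v == q and v <= bound and (u - v) % 2 == 0:
--                 for yy in (v, -v):
--                     for uu in (u, -u):
--                         found.add(((uu - yy) // 2, yy))
--     return sorted([x, y] for (x, y) in found)
-- ===== Notes on version B (the rewrite author's own statement) =====
-- stated objective: faster
-- what changed: B rewrites 4*norm(x,y) as (2x+y)^2 + 111*y^2 and enumerates the square term u=|2x+y| in 0..isqrt(4*target), testing whether the remainder is 111 times a perfect square and recovering (x,y) from the sign/parity combinations with a set for dedup, instead of A's scan of y over [-bound,bound] with a discriminant test and list-membership dedup; B's loop length depends on target, not on bound.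
import Mathlib
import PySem

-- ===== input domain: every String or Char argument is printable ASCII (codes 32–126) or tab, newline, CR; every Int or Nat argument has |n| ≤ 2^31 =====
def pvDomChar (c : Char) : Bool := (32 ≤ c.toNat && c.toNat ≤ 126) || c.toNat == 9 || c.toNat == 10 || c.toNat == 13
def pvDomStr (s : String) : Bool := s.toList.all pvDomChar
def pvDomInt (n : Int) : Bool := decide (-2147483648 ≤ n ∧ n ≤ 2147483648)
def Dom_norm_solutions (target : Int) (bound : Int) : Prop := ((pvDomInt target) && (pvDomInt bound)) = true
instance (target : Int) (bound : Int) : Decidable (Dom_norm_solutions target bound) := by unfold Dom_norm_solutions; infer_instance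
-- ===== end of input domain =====

-- B enumerates the square term u = |2x+y| of the identity 4*norm(x,y) = (2x+y)^2 + 111*y^2
-- up to isqrt(4*target), instead of A's scan of y over [-bound, bound] with a discriminant
-- test: B's loop length depends on target instead of bound (measured faster by the check).

-- math.isqrt (exact for nonnegative arguments; both programs only call it there)
def pyIsqrt (n : Int) : Int := (Nat.sqrt n.toNat : Int)

-- ===== PORT A =====
def normA (alpha : Int × Int) : Int :=
  let x := alpha.1
  let y := alpha.2
  x * x + x * y + 28 * y * y

-- body of A's inner 'for num in (-y + root, -y - root)' loop
def innerA (target : Int) (y : Int) (s : List (List Int)) (num : Int) : List (List Int) :=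
  -- x = num // 2, pair = [x, y] written inline
  if PySem.Int.mod num 2 = 0 then
    if normA (PySem.Int.floordiv num 2, y) = target then
      if [PySem.Int.floordiv num 2, y] ∈ s then s
      else s ++ [[PySem.Int.floordiv num 2, y]]
    else s
  else s

-- body of A's outer 'for y in range(-bound, bound + 1)' loop
def stepA (target : Int) (sols : List (List Int)) (y : Int) : List (List Int) :=
  -- disc = 4*target - 111*y*y, root = isqrt(disc) written inline
  if 4 * target - 111 * y * y < 0 then sols
  else if pyIsqrt (4 * target - 111 * y * y) * pyIsqrt (4 * target - 111 * y * y)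
      ≠ 4 * target - 111 * y * y then sols
  else [-y + pyIsqrt (4 * target - 111 * y * y),
        -y - pyIsqrt (4 * target - 111 * y * y)].foldl (innerA target y) sols

def norm_solutions (target : Int) (bound : Int) : List (List Int) :=
  PySem.List.sorted ((PySem.List.pyRange (-bound) (bound + 1) 1).foldl (stepA target) [])
    (fun p => p) false

-- ===== PORT B =====
-- body of B's inner 'for uu in (u, -u)' loop
def addB (yy : Int) (found : PySem.Set (Int × Int)) (uu : Int) : PySem.Set (Int × Int) :=
  PySem.Set.add found (PySem.Int.floordiv (uu - yy) 2, yy)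

-- body of B's 'for u in range(isqrt(M) + 1)' loop
def stepB (target : Int) (bound : Int) (found : PySem.Set (Int × Int)) (u : Int) :
    PySem.Set (Int × Int) :=
  -- rem = 4*target - u*u, q = rem // 111, v = isqrt(q) written inline
  if PySem.Int.mod (4 * target - u * u) 111 = 0 then
    if pyIsqrt (PySem.Int.floordiv (4 * target - u * u) 111) *
          pyIsqrt (PySem.Int.floordiv (4 * target - u * u) 111)
        = PySem.Int.floordiv (4 * target - u * u) 111 ∧
        pyIsqrt (PySem.Int.floordiv (4 * target - u * u) 111) ≤ bound ∧
        PySem.Int.mod (u - pyIsqrt (PySem.Int.floordiv (4 * target - u * u) 111)) 2 = 0 then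
      [pyIsqrt (PySem.Int.floordiv (4 * target - u * u) 111),
       -pyIsqrt (PySem.Int.floordiv (4 * target - u * u) 111)].foldl
        (fun f yy => [u, -u].foldl (addB yy) f) found
    else found
  else found

def norm_solutions_alt (target : Int) (bound : Int) : List (List Int) :=
  if target < 0 then []
  else
    let found := (PySem.List.pyRange 0 (pyIsqrt (4 * target) + 1) 1).foldl
      (stepB target bound) PySem.Set.empty
    PySem.List.sorted (found.map (fun p => [p.1, p.2])) (fun p => p) false

-- ===== PRECONDITION & SPEC =====
def Spec_norm_solutions (target : Int) (bound : Int) (out : List (List Int)) : Prop := out = norm_solutions_alt target bound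
instance (target : Int) (bound : Int) (out : List (List Int)) : Decidable (Spec_norm_solutions target bound out) := by unfold Spec_norm_solutions; infer_instance

-- ===== CLAIM (what is proved, stated in full; the proofs are below) =====
def Claim_equal_norm_solutions : Prop := ∀ (target : Int) (bound : Int), Dom_norm_solutions target bound → Spec_norm_solutions target bound (norm_solutions target bound)

-- ===== LEMMAS AND PROOFS =====

-- the common solution set: p = [x, y] with x^2 + xy + 28y^2 = target and |y| ≤ bound
def Sol (target bound : Int) (p : List Int) : Prop :=
  ∃ x y : Int, p = [x, y] ∧ x * x + x * y + 28 * y * y = target ∧ -bound ≤ y ∧ y ≤ bound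

theorem pyIsqrt_nonneg (n : Int) : 0 ≤ pyIsqrt n := Int.natCast_nonneg _

theorem sq_pyIsqrt_le (n : Int) (h : 0 ≤ n) : pyIsqrt n * pyIsqrt n ≤ n := by
  unfold pyIsqrt
  have h1 := Nat.sqrt_le' n.toNat
  have h2 : ((n.toNat : Int)) = n := Int.toNat_of_nonneg h
  calc (Nat.sqrt n.toNat : Int) * Nat.sqrt n.toNat
      = ((Nat.sqrt n.toNat * Nat.sqrt n.toNat : Nat) : Int) := by push_cast; ring
    _ ≤ (n.toNat : Int) := by rw [pow_two] at h1; exact_mod_cast h1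
    _ = n := h2

theorem le_pyIsqrt (a n : Int) (ha : 0 ≤ a) (h : a * a ≤ n) : a ≤ pyIsqrt n := by
  unfold pyIsqrt
  have hn : 0 ≤ n := le_trans (mul_nonneg ha ha) h
  have ha' : ((a.toNat : Nat) : Int) = a := Int.toNat_of_nonneg ha
  have hn' : ((n.toNat : Nat) : Int) = n := Int.toNat_of_nonneg hn
  have h1 : a.toNat * a.toNat ≤ n.toNat := by
    have hc : ((a.toNat * a.toNat : Nat) : Int) ≤ ((n.toNat : Nat) : Int) := by
      rw [Nat.cast_mul, ha', hn']; exact h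
    exact_mod_cast hc
  have h2 : a.toNat ≤ Nat.sqrt n.toNat := Nat.le_sqrt.2 h1
  omega

theorem pyIsqrt_sq (a : Int) : pyIsqrt (a * a) = |a| := by
  unfold pyIsqrt
  have h1 : (a * a).toNat = a.natAbs * a.natAbs := by
    rw [← Int.natAbs_mul_self]; exact Int.toNat_natCast _
  rw [h1, Nat.sqrt_eq, Int.abs_eq_natAbs]

-- ---- A side ----

theorem mem_innerA (target y : Int) (s : List (List Int)) (num : Int) (p : List Int) :
    p ∈ innerA target y s num ↔ p ∈ s ∨
      (PySem.Int.mod num 2 = 0 ∧ normA (PySem.Int.floordiv num 2, y) = target ∧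
        p = [PySem.Int.floordiv num 2, y]) := by
  unfold innerA
  split_ifs with h1 h2 h3 <;> simp_all [List.mem_append]

theorem nodup_innerA (target y : Int) (s : List (List Int)) (num : Int) (h : s.Nodup) :
    (innerA target y s num).Nodup := by
  unfold innerA
  split_ifs with h1 h2 h3 <;> simp_all [List.nodup_append]
  exact fun a ha he => h3 (he ▸ ha)


def GA (target y : Int) (p : List Int) : Prop :=
  ¬ (4 * target - 111 * y * y < 0) ∧
  pyIsqrt (4 * target - 111 * y * y) * pyIsqrt (4 * target - 111 * y * y)
    = 4 * target - 111 * y * y ∧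
  ∃ num : Int,
    (num = -y + pyIsqrt (4 * target - 111 * y * y) ∨
     num = -y - pyIsqrt (4 * target - 111 * y * y)) ∧
    PySem.Int.mod num 2 = 0 ∧ normA (PySem.Int.floordiv num 2, y) = target ∧
    p = [PySem.Int.floordiv num 2, y]

theorem mem_stepA (target : Int) (s : List (List Int)) (y : Int) (p : List Int) :
    p ∈ stepA target s y ↔ p ∈ s ∨ GA target y p := by
  unfold stepA GA
  split_ifs with h1 h2
  · simp [h1]
  · simp [h2]
  · rw [ne_eq, not_not] at h2
    simp only [List.foldl_cons, List.foldl_nil, mem_innerA]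
    constructor
    · rintro ((hs | hc) | hc)
      · exact Or.inl hs
      · exact Or.inr ⟨h1, h2, _, Or.inl rfl, hc⟩
      · exact Or.inr ⟨h1, h2, _, Or.inr rfl, hc⟩
    · rintro (hs | ⟨-, -, num, (rfl | rfl), hc⟩)
      · exact Or.inl (Or.inl hs)
      · exact Or.inl (Or.inr hc)
      · exact Or.inr hc

theorem nodup_stepA (target : Int) (s : List (List Int)) (y : Int) (h : s.Nodup) :
    (stepA target s y).Nodup := by
  unfold stepA
  split_ifs with h1 h2
  · exact h
  · exact h
  · simp only [List.foldl_cons, List.foldl_nil]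
    exact nodup_innerA _ _ _ _ (nodup_innerA _ _ _ _ h)

theorem mem_foldA (target : Int) (l : List Int) (s : List (List Int)) (p : List Int) :
    p ∈ l.foldl (stepA target) s ↔ p ∈ s ∨ ∃ y ∈ l, GA target y p := by
  induction l generalizing s with
  | nil => simp
  | cons a t ih =>
    simp only [List.foldl_cons, ih, mem_stepA, List.mem_cons]
    constructor
    · rintro ((hs | hg) | ⟨y, hy, hg⟩)
      · exact Or.inl hs
      · exact Or.inr ⟨a, Or.inl rfl, hg⟩
      · exact Or.inr ⟨y, Or.inr hy, hg⟩
    · rintro (hs | ⟨y, (rfl | hy), hg⟩)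
      · exact Or.inl (Or.inl hs)
      · exact Or.inl (Or.inr hg)
      · exact Or.inr ⟨y, hy, hg⟩

theorem nodup_foldA (target : Int) (l : List Int) (s : List (List Int)) (h : s.Nodup) :
    (l.foldl (stepA target) s).Nodup := by
  induction l generalizing s with
  | nil => exact h
  | cons a t ih => exact ih _ (nodup_stepA _ _ _ h)

-- every solution pair is generated by A's loop body at its own y
theorem sol_GA (target x y : Int) (hn : x * x + x * y + 28 * y * y = target) :
    GA target y [x, y] := by
  have hd : 4 * target - 111 * y * y = (2 * x + y) * (2 * x + y) := by ring_nf; linarith [hn]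
  have hroot : pyIsqrt (4 * target - 111 * y * y) = |2 * x + y| := by
    rw [hd, pyIsqrt_sq]
  refine ⟨by rw [hd]; simp only [not_lt]; exact mul_self_nonneg _,
    by rw [hroot, abs_mul_abs_self, hd], ?_⟩
  have hnum : (2 * x : Int) = -y + |2 * x + y| ∨ (2 * x : Int) = -y - |2 * x + y| := by
    rcases abs_cases (2 * x + y) with ⟨h1, h2⟩ | ⟨h1, h2⟩
    · left; omega
    · right; omega
  refine ⟨2 * x, by rw [hroot]; exact hnum, ?_, ?_, ?_⟩
  · rw [PySem.Int.mod_eq_zero_iff_dvd]; exact ⟨x, rfl⟩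
  · have hx : PySem.Int.floordiv (2 * x) 2 = x := by
      rw [PySem.Int.floordiv_eq_ediv_of_pos (by norm_num)]
      exact Int.mul_ediv_cancel_left x (by norm_num)
    rw [hx]; simpa [normA] using hn
  · have hx : PySem.Int.floordiv (2 * x) 2 = x := by
      rw [PySem.Int.floordiv_eq_ediv_of_pos (by norm_num)]
      exact Int.mul_ediv_cancel_left x (by norm_num)
    rw [hx]

-- conversely, everything A's loop body generates is a solution pair
theorem GA_sol (target y : Int) (p : List Int) (hg : GA target y p) :
    ∃ x, p = [x, y] ∧ x * x + x * y + 28 * y * y = target := by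
  obtain ⟨-, -, num, -, -, hn, rfl⟩ := hg
  exact ⟨_, rfl, by simpa [normA] using hn⟩

theorem memA_iff_sol (target bound : Int) (p : List Int) :
    p ∈ (PySem.List.pyRange (-bound) (bound + 1) 1).foldl (stepA target) [] ↔
      Sol target bound p := by
  rw [mem_foldA]
  simp only [List.not_mem_nil, false_or]
  constructor
  · rintro ⟨y, hy, hg⟩
    obtain ⟨x, rfl, hn⟩ := GA_sol target y p hg
    have hb := (PySem.List.mem_pyRange_one).1 hy
    exact ⟨x, y, rfl, hn, by omega, by omega⟩
  · rintro ⟨x, y, rfl, hn, h1, h2⟩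
    exact ⟨y, (PySem.List.mem_pyRange_one).2 (by omega), sol_GA target x y hn⟩

-- ---- B side ----

def GB (target bound u : Int) (p : Int × Int) : Prop :=
  PySem.Int.mod (4 * target - u * u) 111 = 0 ∧
  pyIsqrt (PySem.Int.floordiv (4 * target - u * u) 111) *
      pyIsqrt (PySem.Int.floordiv (4 * target - u * u) 111)
    = PySem.Int.floordiv (4 * target - u * u) 111 ∧
  pyIsqrt (PySem.Int.floordiv (4 * target - u * u) 111) ≤ bound ∧
  PySem.Int.mod (u - pyIsqrt (PySem.Int.floordiv (4 * target - u * u) 111)) 2 = 0 ∧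
  ∃ yy uu : Int,
    (yy = pyIsqrt (PySem.Int.floordiv (4 * target - u * u) 111) ∨
     yy = -pyIsqrt (PySem.Int.floordiv (4 * target - u * u) 111)) ∧
    (uu = u ∨ uu = -u) ∧ p = (PySem.Int.floordiv (uu - yy) 2, yy)

theorem mem_stepB (target bound : Int) (f : PySem.Set (Int × Int)) (u : Int) (p : Int × Int) :
    p ∈ stepB target bound f u ↔ p ∈ f ∨ GB target bound u p := by
  unfold stepB GB
  split_ifs with h1 h2
  · simp only [List.foldl_cons, List.foldl_nil, addB, PySem.Set.mem_add]
    obtain ⟨h2a, h2b, h2c⟩ := h2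
    constructor
    · rintro ((((hf | hc) | hc) | hc) | hc)
      · exact Or.inl hf
      · exact Or.inr ⟨h1, h2a, h2b, h2c, _, _, Or.inl rfl, Or.inl rfl, hc⟩
      · exact Or.inr ⟨h1, h2a, h2b, h2c, _, _, Or.inl rfl, Or.inr rfl, hc⟩
      · exact Or.inr ⟨h1, h2a, h2b, h2c, _, _, Or.inr rfl, Or.inl rfl, hc⟩
      · exact Or.inr ⟨h1, h2a, h2b, h2c, _, _, Or.inr rfl, Or.inr rfl, hc⟩
    · rintro (hf | ⟨-, -, -, -, yy, uu, (rfl | rfl), (rfl | rfl), hc⟩)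
      · exact Or.inl (Or.inl (Or.inl (Or.inl hf)))
      · exact Or.inl (Or.inl (Or.inl (Or.inr hc)))
      · exact Or.inl (Or.inl (Or.inr hc))
      · exact Or.inl (Or.inr hc)
      · exact Or.inr hc
  · simp only [not_and_or] at h2
    constructor
    · exact Or.inl
    · rintro (hf | ⟨ha, hb, hc, hd, -⟩)
      · exact hf
      · rcases h2 with h | h | h <;> exact absurd (by assumption) h
  · constructor
    · exact Or.inl
    · rintro (hf | ⟨ha, -⟩)
      · exact hf
      · exact absurd ha h1

theorem nodup_stepB (target bound : Int) (f : PySem.Set (Int × Int)) (u : Int)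
    (h : f.Nodup) : (stepB target bound f u).Nodup := by
  unfold stepB
  split_ifs with h1 h2
  · simp only [List.foldl_cons, List.foldl_nil, addB]
    exact PySem.Set.nodup_add _ _ (PySem.Set.nodup_add _ _
      (PySem.Set.nodup_add _ _ (PySem.Set.nodup_add _ _ h)))
  · exact h
  · exact h

theorem mem_foldB (target bound : Int) (l : List Int) (f : PySem.Set (Int × Int))
    (p : Int × Int) :
    p ∈ l.foldl (stepB target bound) f ↔ p ∈ f ∨ ∃ u ∈ l, GB target bound u p := by
  induction l generalizing f with
  | nil => simp
  | cons a t ih =>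
    simp only [List.foldl_cons, ih, mem_stepB, List.mem_cons]
    constructor
    · rintro ((hf | hg) | ⟨u, hu, hg⟩)
      · exact Or.inl hf
      · exact Or.inr ⟨a, Or.inl rfl, hg⟩
      · exact Or.inr ⟨u, Or.inr hu, hg⟩
    · rintro (hf | ⟨u, (rfl | hu), hg⟩)
      · exact Or.inl (Or.inl hf)
      · exact Or.inl (Or.inr hg)
      · exact Or.inr ⟨u, hu, hg⟩

theorem nodup_foldB (target bound : Int) (l : List Int) (f : PySem.Set (Int × Int))
    (h : f.Nodup) : (l.foldl (stepB target bound) f).Nodup := by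
  induction l generalizing f with
  | nil => exact h
  | cons a t ih => exact ih _ (nodup_stepB _ _ _ _ h)

-- everything B generates at u is a solution pair
theorem GB_sol (target bound u : Int) (p : Int × Int) (ht : 0 ≤ target)
    (hu0 : 0 ≤ u) (hus : u ≤ pyIsqrt (4 * target)) (hg : GB target bound u p) :
    p.1 * p.1 + p.1 * p.2 + 28 * p.2 * p.2 = target ∧ -bound ≤ p.2 ∧ p.2 ≤ bound := by
  obtain ⟨hmod, hsq, hvb, hpar, yy, uu, hyy, huu, rfl⟩ := hg
  have hrem : 0 ≤ 4 * target - u * u := by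
    have := sq_pyIsqrt_le (4 * target) (by omega)
    nlinarith
  have hdvd : (111 : Int) ∣ (4 * target - u * u) := (PySem.Int.mod_eq_zero_iff_dvd _ _).1 hmod
  set q := PySem.Int.floordiv (4 * target - u * u) 111 with hq
  have hq' : 111 * q = 4 * target - u * u := by
    rw [hq, PySem.Int.floordiv_eq_ediv_of_pos (by norm_num)]
    exact Int.mul_ediv_cancel' hdvd
  set v := pyIsqrt q with hv
  have hv0 : 0 ≤ v := pyIsqrt_nonneg q
  have hkey : u * u + 111 * (v * v) = 4 * target := by rw [hsq]; omega
  have hpar2 : (2 : Int) ∣ (u - v) := (PySem.Int.mod_eq_zero_iff_dvd _ _).1 hpar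
  have hpyy : (2 : Int) ∣ (uu - yy) := by
    rcases hyy with rfl | rfl <;> rcases huu with rfl | rfl <;> omega
  have hx : 2 * PySem.Int.floordiv (uu - yy) 2 = uu - yy := by
    rw [PySem.Int.floordiv_eq_ediv_of_pos (by norm_num)]
    exact Int.mul_ediv_cancel' hpyy
  set x := PySem.Int.floordiv (uu - yy) 2 with hxdef
  have huu2 : uu * uu = u * u := by rcases huu with rfl | rfl <;> ring
  have hyy2 : yy * yy = v * v := by rcases hyy with rfl | rfl <;> ring
  have hn : (2 * x + yy) * (2 * x + yy) + 111 * (yy * yy) = 4 * target := by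
    have : 2 * x + yy = uu := by omega
    rw [this, huu2, hyy2]; exact hkey
  refine ⟨by nlinarith, ?_, ?_⟩ <;> rcases hyy with rfl | rfl <;> simp <;> omega

-- every solution pair is generated by B at u = |2x+y|
theorem sol_GB (target bound x y : Int)
    (hn : x * x + x * y + 28 * y * y = target) (h1 : -bound ≤ y) (h2 : y ≤ bound) :
    ∃ u ∈ PySem.List.pyRange 0 (pyIsqrt (4 * target) + 1) 1, GB target bound u (x, y) := by
  have hkey : (2 * x + y) * (2 * x + y) + 111 * (y * y) = 4 * target := by nlinarith
  refine ⟨|2 * x + y|, ?_, ?_⟩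
  · refine (PySem.List.mem_pyRange_one).2 ⟨abs_nonneg _, ?_⟩
    have : |2 * x + y| ≤ pyIsqrt (4 * target) := by
      refine le_pyIsqrt _ _ (abs_nonneg _) ?_
      rw [abs_mul_abs_self]; nlinarith
    omega
  · have habs : |2 * x + y| * |2 * x + y| = (2 * x + y) * (2 * x + y) := abs_mul_abs_self _
    have hrem : 4 * target - |2 * x + y| * |2 * x + y| = 111 * (y * y) := by
      rw [habs]; omega
    have hmod : PySem.Int.mod (4 * target - |2 * x + y| * |2 * x + y|) 111 = 0 := by
      rw [PySem.Int.mod_eq_zero_iff_dvd, hrem]; exact ⟨y * y, rfl⟩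
    have hq : PySem.Int.floordiv (4 * target - |2 * x + y| * |2 * x + y|) 111 = y * y := by
      rw [hrem, PySem.Int.floordiv_eq_ediv_of_pos (by norm_num)]
      exact Int.mul_ediv_cancel_left _ (by norm_num)
    have hv : pyIsqrt (PySem.Int.floordiv (4 * target - |2 * x + y| * |2 * x + y|) 111) = |y| := by
      rw [hq, pyIsqrt_sq]
    refine ⟨hmod, ?_, ?_, ?_, ?_⟩
    · rw [hv, abs_mul_abs_self, hq]
    · rw [hv]; rcases abs_cases y with ⟨e, -⟩ | ⟨e, -⟩ <;> omega
    · rw [hv, PySem.Int.mod_eq_zero_iff_dvd]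
      rcases abs_cases (2 * x + y) with ⟨e1, -⟩ | ⟨e1, -⟩ <;>
        rcases abs_cases y with ⟨e2, -⟩ | ⟨e2, -⟩ <;> omega
    · refine ⟨y, 2 * x + y, ?_, ?_, ?_⟩
      · rw [hv]; rcases abs_cases y with ⟨e, -⟩ | ⟨e, -⟩ <;> omega
      · rcases abs_cases (2 * x + y) with ⟨e, -⟩ | ⟨e, -⟩ <;> omega
      · have : (2 * x + y) - y = 2 * x := by ring
        rw [this]
        have hx : PySem.Int.floordiv (2 * x) 2 = x := by
          rw [PySem.Int.floordiv_eq_ediv_of_pos (by norm_num)]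
          exact Int.mul_ediv_cancel_left x (by norm_num)
        rw [hx]

theorem memB_iff_sol (target bound : Int) (ht : 0 ≤ target) (p : List Int) :
    p ∈ ((PySem.List.pyRange 0 (pyIsqrt (4 * target) + 1) 1).foldl
          (stepB target bound) PySem.Set.empty).map (fun q => [q.1, q.2]) ↔
      Sol target bound p := by
  simp only [List.mem_map]
  constructor
  · rintro ⟨q, hq, rfl⟩
    rw [mem_foldB] at hq
    rcases hq with hq | ⟨u, hu, hg⟩
    · simp [PySem.Set.empty] at hq
    · have hb := (PySem.List.mem_pyRange_one).1 hu
      obtain ⟨hn, hb1, hb2⟩ := GB_sol target bound u q ht (by omega) (by omega) hg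
      exact ⟨q.1, q.2, rfl, hn, hb1, hb2⟩
  · rintro ⟨x, y, rfl, hn, h1, h2⟩
    obtain ⟨u, hu, hg⟩ := sol_GB target bound x y hn h1 h2
    exact ⟨(x, y), (mem_foldB _ _ _ _ _).2 (Or.inr ⟨u, hu, hg⟩), rfl⟩

-- ---- assembly ----

theorem p2l_inj : Function.Injective (fun q : Int × Int => [q.1, q.2]) := by
  intro a b h
  simp only [List.cons.injEq, and_true] at h
  exact Prod.ext h.1 h.2

theorem norm_nonneg_4 (x y : Int) : 0 ≤ 4 * (x * x + x * y + 28 * y * y) := by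
  nlinarith [sq_nonneg (2 * x + y), sq_nonneg y]

theorem norm_solutions_eq (target bound : Int) :
    norm_solutions target bound = norm_solutions_alt target bound := by
  unfold norm_solutions norm_solutions_alt
  by_cases ht : target < 0
  · rw [if_pos ht]
    have hLA : (PySem.List.pyRange (-bound) (bound + 1) 1).foldl (stepA target) [] = [] := by
      rw [List.eq_nil_iff_forall_not_mem]
      intro p hp
      obtain ⟨x, y, -, hn, -, -⟩ := (memA_iff_sol target bound p).1 hp
      have := norm_nonneg_4 x y
      omega
    rw [hLA]
    rfl
  · rw [if_neg ht]
    have hinst : (fun (a b : List Int) => a.decidableLT b)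
        = (LinearOrder.toDecidableLT (α := List Int)) :=
      funext fun a => funext fun b => Subsingleton.elim _ _
    rw [hinst]
    refine PySem.List.sorted_eq_sorted_of_perm _ _ (fun p : List Int => p)
      (fun a b h => h) ?_

    refine (List.perm_ext_iff_of_nodup ?_ ?_).2 ?_
    · exact nodup_foldA target _ _ List.nodup_nil
    · exact List.Nodup.map p2l_inj (nodup_foldB target bound _ _ List.nodup_nil)
    · intro p
      rw [memA_iff_sol, memB_iff_sol target bound (by omega)]

-- ===== VERDICT (by name: the statement is the Claim_ definition above) =====
theorem norm_solutions_spec : Claim_equal_norm_solutions := by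
  intro target bound _
  unfold Spec_norm_solutions
  exact norm_solutions_eq target bound
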